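-- pv_equiv track=rewrite | github.com/muhammedemineser/QuranQuiz | django-project/utils.py | char_idx_to_token_idx
-- ===== SOURCE A (Python) =====
-- def char_idx_to_token_idx(tokens: str, char_idx: list[int]):
--     indexes: list[int] = []
--     lengths: list[int] = []
--     for idx in char_idx:
--         pos = 0
--         for i, token in enumerate(tokens.split()):
--             pos += len(token) + 1
--             if idx < pos:
--                 indexes.append(i)
--                 lengths.append(len(token))
--                 break
--     return tuple(indexes), tuple(lengths)
-- ===== SOURCE B (Python) =====
-- def char_idx_to_token_idx(tokens: str, char_idx: list[int]):
--     # Split once; build the cumulative end-position array, then answer each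
--     # query by binary search instead of re-scanning the tokens.
--     toks = tokens.split()
--     ends = []
--     pos = 0
--     for t in toks:
--         pos += len(t) + 1
--         ends.append(pos)
--     lens = [len(t) for t in toks]
--     n = len(ends)
--     indexes = []
--     lengths = []
--     for idx in char_idx:
--         lo, hi = 0, n
--         while lo < hi:
--             mid = (lo + hi) // 2
--             if idx < ends[mid]:
--                 hi = mid
--             else:
--                 lo = mid + 1
--         if lo < n:
--             indexes.append(lo)
--             lengths.append(lens[lo])
--     return tuple(indexes), tuple(lengths)
-- ===== Notes on version B (the rewrite author's own statement) =====
-- stated objective: faster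
-- what changed: Split the string once, precompute the cumulative token-end positions and token lengths, and answer each char index by binary search over the ends array instead of re-splitting and linearly scanning all tokens per index.
import Mathlib
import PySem

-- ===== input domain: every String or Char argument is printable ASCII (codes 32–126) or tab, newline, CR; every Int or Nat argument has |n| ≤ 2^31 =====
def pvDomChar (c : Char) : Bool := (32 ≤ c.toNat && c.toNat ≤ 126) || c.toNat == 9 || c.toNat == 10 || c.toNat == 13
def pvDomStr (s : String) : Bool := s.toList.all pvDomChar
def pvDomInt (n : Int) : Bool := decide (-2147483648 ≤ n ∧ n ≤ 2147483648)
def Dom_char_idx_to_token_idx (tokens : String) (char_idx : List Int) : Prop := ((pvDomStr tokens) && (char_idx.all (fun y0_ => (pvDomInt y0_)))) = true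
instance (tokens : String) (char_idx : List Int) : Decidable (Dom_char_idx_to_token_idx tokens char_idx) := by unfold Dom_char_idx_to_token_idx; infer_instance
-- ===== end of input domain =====

-- B splits once, precomputes cumulative token-end positions and lengths, and binary-searches
-- each char index instead of re-splitting and linearly scanning the tokens per index (objective: faster).

-- ===== PORT A =====
-- inner 'for i, token in enumerate(tokens.split())' loop with its running pos and break
def pvAInner (idx : Int) : List String → Int → Int → Option (Int × Int)
  | [], _, _ => none
  | t :: ts, i, pos =>
    let pos' := pos + PySem.Str.len t + 1
    if idx < pos' then some (i, PySem.Str.len t)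
    else pvAInner idx ts (i + 1) pos'

def char_idx_to_token_idx (tokens : String) (char_idx : List Int) : List Int × List Int :=
  char_idx.foldl (fun acc idx =>
    match pvAInner idx (PySem.Str.split₀ tokens) 0 0 with
    | some (i, l) => (acc.1 ++ [i], acc.2 ++ [l])
    | none => acc) ([], [])

-- ===== PORT B =====
-- the 'for t in toks: pos += len(t)+1; ends.append(pos)' loop
def pvEnds : List String → Int → List Int
  | [], _ => []
  | t :: ts, pos =>
    let pos' := pos + PySem.Str.len t + 1
    pos' :: pvEnds ts pos'

-- the 'while lo < hi' binary-search loop of B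
def pvBsearch (ends : List Int) (idx : Int) (lo hi : Nat) : Nat :=
  if h : lo < hi then
    let mid := (lo + hi) / 2
    if idx < ends.getD mid 0 then pvBsearch ends idx lo mid
    else pvBsearch ends idx (mid + 1) hi
  else lo
termination_by hi - lo
decreasing_by all_goals omega

def char_idx_to_token_idx_alt (tokens : String) (char_idx : List Int) : List Int × List Int :=
  let toks := PySem.Str.split₀ tokens
  let ends := pvEnds toks 0
  let lens := toks.map PySem.Str.len
  let n := ends.length
  char_idx.foldl (fun acc idx =>
    let lo := pvBsearch ends idx 0 n
    if lo < n then (acc.1 ++ [(lo : Int)], acc.2 ++ [lens.getD lo 0]) else acc) ([], [])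

-- ===== PRECONDITION & SPEC =====
def Spec_char_idx_to_token_idx (tokens : String) (char_idx : List Int) (out : List Int × List Int) : Prop := out = char_idx_to_token_idx_alt tokens char_idx
instance (tokens : String) (char_idx : List Int) (out : List Int × List Int) : Decidable (Spec_char_idx_to_token_idx tokens char_idx out) := by unfold Spec_char_idx_to_token_idx; infer_instance

-- ===== CLAIM (what is proved, stated in full; the proofs are below) =====
def Claim_equal_char_idx_to_token_idx : Prop := ∀ (tokens : String) (char_idx : List Int), Dom_char_idx_to_token_idx tokens char_idx → Spec_char_idx_to_token_idx tokens char_idx (char_idx_to_token_idx tokens char_idx)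

-- ===== LEMMAS AND PROOFS =====

-- A's linear scan returns the first index whose cumulative end exceeds idx
lemma pvAInner_eq (idx : Int) : ∀ (toks : List String) (i pos : Int),
    pvAInner idx toks i pos =
      (if (pvEnds toks pos).findIdx (fun e => decide (idx < e)) < (pvEnds toks pos).length
       then some (i + ((pvEnds toks pos).findIdx (fun e => decide (idx < e)) : Int),
                  (toks.map PySem.Str.len).getD ((pvEnds toks pos).findIdx (fun e => decide (idx < e))) 0)
       else none)
  | [], i, pos => by simp [pvAInner, pvEnds]
  | t :: ts, i, pos => by
    by_cases h : idx < pos + PySem.Str.len t + 1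
    · simp only [pvAInner, pvEnds, if_pos h, List.findIdx_cons, decide_eq_true h, cond_true,
        List.length_cons, if_pos (Nat.succ_pos _), List.map_cons, List.getD_cons_zero,
        Nat.cast_zero, add_zero]
    · simp only [pvAInner, pvEnds, if_neg h, List.findIdx_cons, decide_eq_false h, cond_false,
        List.length_cons, List.map_cons]
      rw [pvAInner_eq idx ts (i + 1) (pos + PySem.Str.len t + 1)]
      split_ifs with h2 h3 h3
      · simp only [List.getD_cons_succ, Option.some.injEq, Prod.mk.injEq]
        exact ⟨by omega, trivial⟩
      · omega
      · omega
      · rfl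

lemma pvEnds_gt : ∀ (toks : List String) (pos : Int) (x : Int), x ∈ pvEnds toks pos → pos < x
  | [], _, _, hx => by simp [pvEnds] at hx
  | t :: ts, pos, x, hx => by
    have hlen : 0 ≤ PySem.Str.len t := by simp [PySem.Str.len_eq]
    simp only [pvEnds, List.mem_cons] at hx
    rcases hx with h | h
    · omega
    · have := pvEnds_gt ts (pos + PySem.Str.len t + 1) x h
      omega

lemma pvEnds_pairwise : ∀ (toks : List String) (pos : Int), (pvEnds toks pos).Pairwise (· ≤ ·)
  | [], _ => by simp [pvEnds]
  | t :: ts, pos => by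
    simp only [pvEnds, List.pairwise_cons]
    exact ⟨fun x hx => le_of_lt (pvEnds_gt _ _ _ hx), pvEnds_pairwise ts _⟩

lemma getD_mono (ends : List Int) (hp : ends.Pairwise (· ≤ ·)) (j k : Nat) (hjk : j ≤ k)
    (hk : k < ends.length) : ends.getD j 0 ≤ ends.getD k 0 := by
  rcases eq_or_lt_of_le hjk with rfl | h
  · exact le_refl _
  · rw [List.getD_eq_getElem ends 0 (by omega), List.getD_eq_getElem ends 0 hk]
    exact List.pairwise_iff_getElem.mp hp j k (by omega) hk h

lemma pvBsearch_spec (ends : List Int) (idx : Int)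
    (mono : ∀ j k : Nat, j ≤ k → k < ends.length → ends.getD j 0 ≤ ends.getD k 0) :
    ∀ (lo hi : Nat), lo ≤ hi → hi ≤ ends.length →
    (∀ j, j < lo → ¬ idx < ends.getD j 0) →
    (∀ j, hi ≤ j → j < ends.length → idx < ends.getD j 0) →
    pvBsearch ends idx lo hi ≤ ends.length ∧
    (∀ j, j < pvBsearch ends idx lo hi → ¬ idx < ends.getD j 0) ∧
    (pvBsearch ends idx lo hi < ends.length → idx < ends.getD (pvBsearch ends idx lo hi) 0) := by
  intro lo hi
  induction lo, hi using pvBsearch.induct ends idx with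
  | case1 lo hi h mid hlt ih =>
    intro _ hhi hlo' hhi'
    rw [pvBsearch, dif_pos h, if_pos hlt]
    exact ih (by omega) (by omega)
      hlo'
      (fun j hj1 hj2 => lt_of_lt_of_le hlt (mono mid j (by omega) hj2))
  | case2 lo hi h mid hge ih =>
    intro _ hhi hlo' hhi'
    rw [pvBsearch, dif_pos h, if_neg hge]
    exact ih (by omega) hhi
      (fun j hj => by
        intro hc
        exact hge (lt_of_lt_of_le hc (mono j mid (by omega) (by omega))))
      hhi'
  | case3 lo hi h =>
    intro hle hhi hlo' hhi'
    rw [pvBsearch, dif_neg h]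
    exact ⟨by omega, fun j hj => hlo' j hj, fun hr => hhi' lo (by omega) hr⟩

lemma findIdx_eq_of (p : Int → Bool) : ∀ (l : List Int) (r : Nat),
    r ≤ l.length → (∀ j, j < r → ¬ p (l.getD j 0) = true) →
    (r < l.length → p (l.getD r 0) = true) → l.findIdx p = r
  | [], r, hr, _, _ => by
    have : r = 0 := by simpa using hr
    simp [this]
  | a :: l, r, hr, h1, h2 => by
    cases r with
    | zero =>
      have := h2 (by simp)
      simp only [List.getD_cons_zero] at this
      simp [List.findIdx_cons, this]
    | succ r' =>
      have ha := h1 0 (by omega)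
      simp only [List.getD_cons_zero, Bool.not_eq_true] at ha
      rw [List.findIdx_cons, ha, cond_false]
      have := findIdx_eq_of p l r' (by simpa using hr)
        (fun j hj => by simpa using h1 (j + 1) (by omega))
        (fun hl => by simpa using h2 (by simpa using hl))
      omega

lemma pvBsearch_eq_findIdx (toks : List String) (idx : Int) :
    pvBsearch (pvEnds toks 0) idx 0 (pvEnds toks 0).length
      = (pvEnds toks 0).findIdx (fun e => decide (idx < e)) := by
  have mono := fun j k hjk hk => getD_mono (pvEnds toks 0) (pvEnds_pairwise toks 0) j k hjk hk
  obtain ⟨hle, hlt, hin⟩ := pvBsearch_spec (pvEnds toks 0) idx mono 0 (pvEnds toks 0).length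
    (by omega) (le_refl _) (by omega) (by omega)
  exact (findIdx_eq_of _ _ _ hle
    (fun j hj => by simpa using hlt j hj)
    (fun hr => by simpa using hin hr)).symm

-- ===== VERDICT (by name: the statement is the Claim_ definition above) =====
theorem char_idx_to_token_idx_spec : Claim_equal_char_idx_to_token_idx := by
  unfold Claim_equal_char_idx_to_token_idx
  intro tokens char_idx _
  unfold Spec_char_idx_to_token_idx
  simp only [char_idx_to_token_idx, char_idx_to_token_idx_alt]
  congr 1
  funext acc idx
  rw [pvAInner_eq, ← pvBsearch_eq_findIdx]
  by_cases h : pvBsearch (pvEnds (PySem.Str.split₀ tokens) 0) idx 0 (pvEnds (PySem.Str.split₀ tokens) 0).length < (pvEnds (PySem.Str.split₀ tokens) 0).length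
  · simp [h]
  · simp [h]
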